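-- pv_equiv track=rewrite | github.com/Defelo/AdventOfCode | Python/2016/07.py | check
-- ===== SOURCE A (Python) =====
-- def check(ip):
--     tmp = ""
--     c = 0
--     ok = False
--     for x in ip:
--         tmp += x
--         if x == "[":
--             c += 1
--             tmp = ""
--         elif x == "]":
--             c -= 1
--             tmp = ""
--         elif len(tmp) >= 4:
--             if tmp[-1] == tmp[-4] and tmp[-2] == tmp[-3] and tmp[-1] != tmp[-2]:
--                 if c:
--                     return False
--                 ok = True
--     return ok
-- ===== SOURCE B (Python) =====
-- def _has_abba(s):
--     while len(s) >= 4: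
--         if s[0] == s[3] and s[1] == s[2] and s[0] != s[1]:
--             return True
--         s = s[1:]
--     return False
--
--
-- def check(ip):
--     # tokenize: list of (segment, depth) for the text between brackets
--     segs = []
--     depth = 0
--     cur = ""
--     for ch in ip:
--         if ch == "[":
--             segs.append((cur, depth))
--             depth += 1
--             cur = ""
--         elif ch == "]":
--             segs.append((cur, depth))
--             depth -= 1
--             cur = ""
--         else:
--             cur += ch
--     segs.append((cur, depth))
--     bad = any(d != 0 and _has_abba(s) for s, d in segs)
--     good = any(d == 0 and _has_abba(s) for s, d in segs)
--     return (not bad) and good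
-- ===== Notes on version B (the rewrite author's own statement) =====
-- stated objective: simpler
-- what changed: B first tokenizes the address into (segment, bracket-depth) pieces in one pass and then scans each whole segment for an ABBA window with a helper, instead of A's single character-by-character loop that keeps a growing suffix buffer and re-tests its last four characters at every step.
import Mathlib
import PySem

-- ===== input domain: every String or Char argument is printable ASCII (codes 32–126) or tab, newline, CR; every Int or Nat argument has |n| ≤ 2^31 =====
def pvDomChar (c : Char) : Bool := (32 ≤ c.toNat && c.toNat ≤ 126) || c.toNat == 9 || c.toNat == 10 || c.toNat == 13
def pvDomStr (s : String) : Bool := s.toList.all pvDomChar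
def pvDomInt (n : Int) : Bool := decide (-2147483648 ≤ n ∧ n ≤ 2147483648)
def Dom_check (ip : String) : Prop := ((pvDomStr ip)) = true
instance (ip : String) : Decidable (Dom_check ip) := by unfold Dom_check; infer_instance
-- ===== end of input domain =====

-- B tokenizes the address into (segment, bracket-depth) pieces and scans each whole
-- segment for an ABBA window, instead of A's char-by-char running-suffix check;
-- objective: simpler decomposition (no speed claim).

-- ===== PORT A =====
-- literal port of A's single scan: tmp accumulates since the last bracket, c is the
-- bracket counter, ok the found flag; the inner test uses Python's negative indices.
def checkLoop : List Char → List Char → Int → Bool → Bool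
  | [], _tmp, _c, ok => ok
  | x :: xs, tmp, c, ok =>
    let tmp' := tmp ++ [x]
    if x = '[' then checkLoop xs [] (c + 1) ok
    else if x = ']' then checkLoop xs [] (c - 1) ok
    else if 4 ≤ tmp'.length then
      if PySem.List.pyGet? tmp' (-1) = PySem.List.pyGet? tmp' (-4) ∧
         PySem.List.pyGet? tmp' (-2) = PySem.List.pyGet? tmp' (-3) ∧
         PySem.List.pyGet? tmp' (-1) ≠ PySem.List.pyGet? tmp' (-2) then
        if c ≠ 0 then false else checkLoop xs tmp' c true
      else checkLoop xs tmp' c ok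
    else checkLoop xs tmp' c ok

def check (ip : String) : Bool := checkLoop ip.toList [] 0 false

-- ===== PORT B =====
-- port of Source B's _has_abba: slide a window over the whole segment
def hasAbba : List Char → Bool
  | a :: b :: c :: d :: t => (a == d && b == c && !(a == b)) || hasAbba (b :: c :: d :: t)
  | _ => false

-- port of Source B's tokenizing loop: list of (segment, depth) with the trailing segment appended
def tokenize : List Char → Int → List Char → List (List Char × Int)
  | [], d, cur => [(cur, d)]
  | ch :: rest, d, cur =>
    if ch = '[' then (cur, d) :: tokenize rest (d + 1) []
    else if ch = ']' then (cur, d) :: tokenize rest (d - 1) []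
    else tokenize rest d (cur ++ [ch])

def check_alt (ip : String) : Bool :=
  let segs := tokenize ip.toList 0 []
  let bad := segs.any (fun p => decide (p.2 ≠ 0) && hasAbba p.1)
  let good := segs.any (fun p => decide (p.2 = 0) && hasAbba p.1)
  !bad && good

-- ===== PRECONDITION & SPEC =====
def Spec_check (ip : String) (out : Bool) : Prop := out = check_alt ip
instance (ip : String) (out : Bool) : Decidable (Spec_check ip out) := by unfold Spec_check; infer_instance

-- ===== CLAIM (what is proved, stated in full; the proofs are below) =====
def Claim_equal_check : Prop := ∀ (ip : String), Dom_check ip → Spec_check ip (check ip)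

-- ===== LEMMAS AND PROOFS =====

-- whether the last four characters of s ++ [x] form an ABBA window
def endWin (s : List Char) (x : Char) : Bool :=
  match s.drop (s.length - 3) with
  | [p, q, r] => p == x && q == r && !(p == q)
  | _ => false

-- B's verdict on a token list, with the found-flag already carrying ok
def bsem (L : List (List Char × Int)) (ok : Bool) : Bool :=
  if L.any (fun p => decide (p.2 ≠ 0) && hasAbba p.1) then false
  else ok || L.any (fun p => decide (p.2 = 0) && hasAbba p.1)

theorem endWin_cons (a : Char) (s : List Char) (x : Char) (h : 3 ≤ s.length) :
    endWin (a :: s) x = endWin s x := by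
  unfold endWin
  rw [show (a :: s).length - 3 = (s.length - 3) + 1 by simp; omega, List.drop_succ_cons]

theorem hasAbba_snoc (s : List Char) (x : Char) :
    hasAbba (s ++ [x]) = (hasAbba s || endWin s x) := by
  induction s with
  | nil => simp [hasAbba, endWin]
  | cons a s' ih =>
    rcases s' with _ | ⟨b, _ | ⟨c, _ | ⟨d, t⟩⟩⟩
    · simp [hasAbba, endWin]
    · simp [hasAbba, endWin]
    · simp [hasAbba, endWin]
    · have e1 : hasAbba (a :: b :: c :: d :: (t ++ [x])) =
          ((a == d && b == c && !(a == b)) || hasAbba (b :: c :: d :: (t ++ [x]))) := rfl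
      have e2 : hasAbba (a :: b :: c :: d :: t) =
          ((a == d && b == c && !(a == b)) || hasAbba (b :: c :: d :: t)) := rfl
      have e3 := endWin_cons a (b :: c :: d :: t) x (by simp)
      have e4 : (b :: c :: d :: (t ++ [x])) = (b :: c :: d :: t) ++ [x] := by simp
      show hasAbba (a :: b :: c :: d :: (t ++ [x])) =
        (hasAbba (a :: b :: c :: d :: t) || endWin (a :: b :: c :: d :: t) x)
      rw [e1, e4, ih, e2, e3, Bool.or_assoc]

theorem hasAbba_append (u s : List Char) (h : hasAbba s = true) :
    hasAbba (s ++ u) = true := by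
  induction u generalizing s with
  | nil => simpa using h
  | cons y u' ih =>
    have : s ++ y :: u' = (s ++ [y]) ++ u' := by simp
    rw [this]
    exact ih _ (by rw [hasAbba_snoc]; simp [h])

theorem tokenize_head (xs : List Char) (d : Int) (cur : List Char) :
    ∃ u rest, tokenize xs d cur = (cur ++ u, d) :: rest := by
  induction xs generalizing cur with
  | nil => exact ⟨[], [], by simp [tokenize]⟩
  | cons ch rest ih =>
    by_cases h1 : ch = '['
    · exact ⟨[], tokenize rest (d + 1) [], by simp [tokenize, h1]⟩
    · by_cases h2 : ch = ']'
      · exact ⟨[], tokenize rest (d - 1) [], by simp [tokenize, h2]⟩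
      · obtain ⟨u, r, hr⟩ := ih (cur ++ [ch])
        exact ⟨[ch] ++ u, r, by simp [tokenize, h1, h2, hr]⟩

-- A's negative-index test equals endWin
theorem acond_iff (tmp : List Char) (x : Char) :
    endWin tmp x = true ↔
      (4 ≤ (tmp ++ [x]).length ∧
       (PySem.List.pyGet? (tmp ++ [x]) (-1) = PySem.List.pyGet? (tmp ++ [x]) (-4) ∧
        PySem.List.pyGet? (tmp ++ [x]) (-2) = PySem.List.pyGet? (tmp ++ [x]) (-3) ∧
        PySem.List.pyGet? (tmp ++ [x]) (-1) ≠ PySem.List.pyGet? (tmp ++ [x]) (-2))) := by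
  rcases htr : tmp.reverse with _ | ⟨r, _ | ⟨q, _ | ⟨p, front⟩⟩⟩ <;>
    replace htr := congrArg List.reverse htr <;> rw [List.reverse_reverse] at htr <;> subst htr
  · simp [endWin]
  · simp [endWin]
  · simp [endWin]
  · set f := front.reverse with hf
    have hsplit : (r :: q :: p :: front).reverse = f ++ [p, q, r] := by simp [hf]
    rw [hsplit]
    have hEW : endWin (f ++ [p, q, r]) x = (p == x && q == r && !(p == q)) := by
      unfold endWin
      rw [show (f ++ [p, q, r]).length - 3 = f.length by simp]
      rw [List.drop_left]
    have hlen : 4 ≤ ((f ++ [p, q, r]) ++ [x]).length := by simp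
    have hm1 : PySem.List.pyGet? ((f ++ [p, q, r]) ++ [x]) (-1) = some x :=
      PySem.List.pyGet?_neg_one_append_singleton _ _
    have hflat : (f ++ [p, q, r]) ++ [x] = f ++ [p, q, r, x] := by simp
    have hlen' : (f ++ [p, q, r, x]).length = f.length + 4 := by simp
    have hm4 : PySem.List.pyGet? ((f ++ [p, q, r]) ++ [x]) (-4) = some p := by
      rw [hflat, PySem.List.pyGet?_neg_ofNat _ 4 (by omega) (by omega), hlen']
      rw [show f.length + 4 - 4 = f.length + 0 by omega]
      rw [List.getElem?_append_right (by omega)]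
      simp
    have hm2 : PySem.List.pyGet? ((f ++ [p, q, r]) ++ [x]) (-2) = some r := by
      rw [hflat, PySem.List.pyGet?_neg_ofNat _ 2 (by omega) (by omega), hlen']
      rw [show f.length + 4 - 2 = f.length + 2 by omega]
      rw [List.getElem?_append_right (by omega)]
      simp
    have hm3 : PySem.List.pyGet? ((f ++ [p, q, r]) ++ [x]) (-3) = some q := by
      rw [hflat, PySem.List.pyGet?_neg_ofNat _ 3 (by omega) (by omega), hlen']
      rw [show f.length + 4 - 3 = f.length + 1 by omega]
      rw [List.getElem?_append_right (by omega)]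
      simp
    rw [hEW, hm1, hm2, hm3, hm4]
    simp only [Bool.and_eq_true, beq_iff_eq, Bool.not_eq_true', beq_eq_false_iff_ne, ne_eq,
      Option.some.injEq]
    constructor
    · rintro ⟨⟨h1, h2⟩, h3⟩
      exact ⟨hlen, h1.symm, h2.symm, fun hxr => h3 ((h1.trans hxr).trans h2.symm)⟩
    · rintro ⟨-, h1, h2, h3⟩
      exact ⟨⟨h1.symm, h2.symm⟩, fun hpq => h3 ((h1.trans hpq).trans h2.symm)⟩

theorem bsem_cons (tmp : List Char) (c : Int) (L : List (List Char × Int)) (ok : Bool)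
    (inv : hasAbba tmp = true → c = 0 ∧ ok = true) :
    bsem ((tmp, c) :: L) ok = bsem L ok := by
  by_cases h : hasAbba tmp = true
  · obtain ⟨hc, hok⟩ := inv h
    subst hc hok
    simp [bsem, h]
  · have h' : hasAbba tmp = false := by simpa using h
    simp [bsem, h']

theorem main_lemma (xs : List Char) (tmp : List Char) (c : Int) (ok : Bool)
    (inv : hasAbba tmp = true → c = 0 ∧ ok = true) :
    checkLoop xs tmp c ok = bsem (tokenize xs c tmp) ok := by
  induction xs generalizing tmp c ok with
  | nil =>
    by_cases h : hasAbba tmp = true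
    · obtain ⟨hc, hok⟩ := inv h
      subst hc hok
      simp [checkLoop, tokenize, bsem, h]
    · have h' : hasAbba tmp = false := by simpa using h
      simp [checkLoop, tokenize, bsem, h']
  | cons x xs ih =>
    by_cases h1 : x = '['
    · rw [show checkLoop (x :: xs) tmp c ok = checkLoop xs [] (c + 1) ok by
        simp [checkLoop, h1]]
      rw [show tokenize (x :: xs) c tmp = (tmp, c) :: tokenize xs (c + 1) [] by
        simp [tokenize, h1]]
      rw [ih [] (c + 1) ok (by simp [hasAbba]), bsem_cons tmp c _ ok inv]
    · by_cases h2 : x = ']'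
      · rw [show checkLoop (x :: xs) tmp c ok = checkLoop xs [] (c - 1) ok by
          simp [checkLoop, h1, h2]]
        rw [show tokenize (x :: xs) c tmp = (tmp, c) :: tokenize xs (c - 1) [] by
          simp [tokenize, h1, h2]]
        rw [ih [] (c - 1) ok (by simp [hasAbba]), bsem_cons tmp c _ ok inv]
      · rw [show tokenize (x :: xs) c tmp = tokenize xs c (tmp ++ [x]) by
          simp [tokenize, h1, h2]]
        rw [show checkLoop (x :: xs) tmp c ok =
            (if 4 ≤ (tmp ++ [x]).length then
              if PySem.List.pyGet? (tmp ++ [x]) (-1) = PySem.List.pyGet? (tmp ++ [x]) (-4) ∧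
                 PySem.List.pyGet? (tmp ++ [x]) (-2) = PySem.List.pyGet? (tmp ++ [x]) (-3) ∧
                 PySem.List.pyGet? (tmp ++ [x]) (-1) ≠ PySem.List.pyGet? (tmp ++ [x]) (-2) then
                if c ≠ 0 then false else checkLoop xs (tmp ++ [x]) c true
              else checkLoop xs (tmp ++ [x]) c ok
            else checkLoop xs (tmp ++ [x]) c ok) by
          simp [checkLoop, h1, h2]]
        split_ifs with hlen hcond hc
        · -- window found, inside brackets: A returns False
          have hEW : endWin tmp x = true := (acond_iff tmp x).mpr ⟨hlen, hcond⟩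
          have habba : hasAbba (tmp ++ [x]) = true := by
            rw [hasAbba_snoc, hEW]; simp
          obtain ⟨u, rest, hT⟩ := tokenize_head xs c (tmp ++ [x])
          rw [hT]
          have hg : hasAbba (tmp ++ x :: u) = true := by
            simpa using hasAbba_append u _ habba
          simp [bsem, hg, hc]
        · -- window found at depth 0: ok becomes true
          have hEW : endWin tmp x = true := (acond_iff tmp x).mpr ⟨hlen, hcond⟩
          have habba : hasAbba (tmp ++ [x]) = true := by
            rw [hasAbba_snoc, hEW]; simp
          rw [ih (tmp ++ [x]) c true (fun _ => ⟨by omega, rfl⟩)]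
          obtain ⟨u, rest, hT⟩ := tokenize_head xs c (tmp ++ [x])
          rw [hT]
          have hg : hasAbba (tmp ++ x :: u) = true := by
            simpa using hasAbba_append u _ habba
          have hc0 : c = 0 := by omega
          subst hc0
          simp [bsem, hg]
        · -- long enough but no window
          have hEW : endWin tmp x = false := by
            rw [Bool.eq_false_iff]
            intro hEW
            exact hcond ((acond_iff tmp x).mp hEW).2
          exact ih (tmp ++ [x]) c ok (by rw [hasAbba_snoc, hEW, Bool.or_false]; exact inv)
        · -- too short for a window
          have hEW : endWin tmp x = false := by
            rw [Bool.eq_false_iff]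
            intro hEW
            exact hlen ((acond_iff tmp x).mp hEW).1
          exact ih (tmp ++ [x]) c ok (by rw [hasAbba_snoc, hEW, Bool.or_false]; exact inv)

-- ===== VERDICT (by name: the statement is the Claim_ definition above) =====
theorem check_spec : Claim_equal_check := by
  intro ip _
  unfold Spec_check check check_alt
  rw [main_lemma _ _ _ _ (by simp [hasAbba])]
  unfold bsem
  split_ifs with h
  · simp only [h, Bool.not_true, Bool.false_and]
  · have h' : (tokenize ip.toList 0 []).any (fun p => decide (p.2 ≠ 0) && hasAbba p.1) = false := by
      simpa using h
    simp only [h', Bool.not_false, Bool.true_and, Bool.false_or]
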